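/- GENERATED by farm/mkstatement.py from design/units.tsv (unit `start_decoder.C7a`) and the assertions of Vorbis/Spec/StartDecoderC7.lean — do not edit.
   THE STATEMENT of the proof unit `start_decoder.C7a`: segment C7a of `start_decoder` (9 instructions; entries 0x1146d2;
   exits 0x1146f5,0x1149ba; ranges 0x1146d2-0x1146ef)
   takes each of its entry assertions to one of its exit assertions (`Vorbis.Spec.StartDecoder.SegC7a`), given the contracts of its callees.
   What the names mean: Vorbis/Spec/Basic.lean (the shared hypotheses), Vorbis/Spec/StartDecoderC7.lean (the assertions). The theorem to prove:
   `theorem start_decoder_C7a_ok : Vorbis.Spec.start_decoder_C7a.Statement`. -/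
import Vorbis.Spec.Codebook
import Vorbis.Spec.StartDecoderC7
namespace Vorbis.Spec.start_decoder_C7a
open X86 X86.User Asan

/-- The statement of unit `start_decoder.C7a`. -/
def Statement : Prop :=
  ∀ (Lay : Layout) (_hLay : Lay.hi = 0x1000000) (μ : Microarch) (_hμ : UserX.MicroOK μ) (u₀ : State)
    (_hcode : HasCodeNat Lay u₀ Vorbis.L.start_decoder.entry Vorbis.Code.code_start_decoder.nat Vorbis.L.start_decoder.size)
    (_h_asan_load4_noabort : Asan.SmallCheck Lay μ Vorbis.WayInv (Vorbis.CodeOK u₀) [.rax, .rcx, .rdx] 4 Vorbis.L.__asan_load4_noabort.entry)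
    (_h_compute_codewords : ∀ (others : List Obj) (frames : List (Nat × FrameLayout)) (Blk : Block → Prop), Calls Lay μ Vorbis.WayInv (Vorbis.conv u₀) Vorbis.L.compute_codewords.entry (Vorbis.Spec.compute_codewords.spec others frames Blk)),
    Vorbis.Spec.StartDecoder.SegC7a Lay μ u₀

end Vorbis.Spec.start_decoder_C7a
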